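-- pv_equiv track=rewrite | github.com/nberkow/organism | util.py | rank_genomes_by_stat
-- ===== SOURCE A (Python) =====
-- def rank_genomes_by_stat(round_stats, stat):
--
--     """
--     rank genomes for the given stat and return the sorted list
--
--     round_stats - Nested dict. keys are raw genome sequences, vals are a dictionary of stats
--
--     stat - the stat to use for ranking
--     """
--
--     ranked_genomes = []
--
--     genome_by_stat_value = {}
--     for g in round_stats:
--         stat_val = round_stats[g][stat]
--         if not stat_val in genome_by_stat_value:
--             genome_by_stat_value[stat_val] = []
--         genome_by_stat_value[stat_val].append(g)
--
--     ordered_values = sorted(list(genome_by_stat_value.keys()), reverse=True)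
--
--     for stat_val in ordered_values:
--         tied_genomes = genome_by_stat_value[stat_val]
--         for genome in tied_genomes:
--             ranked_genomes.append(genome)
--
--     return(ranked_genomes)
-- ===== SOURCE B (Python) =====
-- def rank_genomes_by_stat(round_stats, stat):
--     """rank genomes descending by the given stat (stable: ties keep insertion order)"""
--     return sorted(round_stats, key=lambda g: round_stats[g][stat], reverse=True)
-- ===== Notes on version B (the rewrite author's own statement) =====
-- stated objective: simpler
-- what changed: B replaces A's group-by-stat dict, descending sort of the distinct stat values and flatten loop with a single stable descending sort of the genome keys by their stat value (ties keep insertion order).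
import Mathlib
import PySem

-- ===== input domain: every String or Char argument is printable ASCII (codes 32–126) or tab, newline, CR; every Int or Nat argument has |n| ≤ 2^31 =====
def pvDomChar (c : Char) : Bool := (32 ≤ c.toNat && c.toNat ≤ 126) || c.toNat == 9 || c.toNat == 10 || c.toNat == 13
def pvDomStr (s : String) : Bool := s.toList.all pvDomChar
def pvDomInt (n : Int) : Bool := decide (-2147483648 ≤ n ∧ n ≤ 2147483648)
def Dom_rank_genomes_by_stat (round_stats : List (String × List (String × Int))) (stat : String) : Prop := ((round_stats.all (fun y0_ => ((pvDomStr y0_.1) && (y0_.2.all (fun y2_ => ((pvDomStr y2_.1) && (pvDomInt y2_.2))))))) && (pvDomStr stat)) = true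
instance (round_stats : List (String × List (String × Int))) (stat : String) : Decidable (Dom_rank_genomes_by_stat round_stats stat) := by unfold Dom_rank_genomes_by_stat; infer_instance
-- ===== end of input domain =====

-- B replaces A's group-by-stat dict + descending sort of distinct values + flatten with one
-- stable descending sort of the genome keys (objective: simpler). Return values only; no mutation.

-- ===== PORT A =====
-- round_stats[g][stat]; getD's defaults are never used inside Pre_ (g is a key, stat is present)
def pvStatOf (rsd : PySem.Dict String (List (String × Int))) (stat g : String) : Int :=
  PySem.Dict.getD (PySem.Dict.ofList (PySem.Dict.getD rsd g [])) stat 0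

def rank_genomes_by_stat (round_stats : List (String × List (String × Int))) (stat : String) : List String :=
  let rsd : PySem.Dict String (List (String × Int)) := PySem.Dict.ofList round_stats
  let gbv : PySem.Dict Int (List String) :=
    rsd.keys.foldl (fun gbv g =>
      let stat_val := pvStatOf rsd stat g
      let gbv := if gbv.contains stat_val then gbv else gbv.insert stat_val []
      gbv.modify stat_val [] (fun l => l ++ [g])) PySem.Dict.empty
  let ordered_values := PySem.List.sorted gbv.keys (fun v => v) true
  ordered_values.foldl (fun acc stat_val =>
    (gbv.getD stat_val []).foldl (fun acc2 genome => acc2 ++ [genome]) acc) []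

-- ===== PORT B =====
def rank_genomes_by_stat_alt (round_stats : List (String × List (String × Int))) (stat : String) : List String :=
  let rsd : PySem.Dict String (List (String × Int)) := PySem.Dict.ofList round_stats
  PySem.List.sorted rsd.keys (fun g => pvStatOf rsd stat g) true

-- ===== PRECONDITION & SPEC =====
-- A raises KeyError when some genome's stats dict lacks the requested stat; Pre_ excludes exactly those inputs.
def Pre_rank_genomes_by_stat (round_stats : List (String × List (String × Int))) (stat : String) : Prop :=
  ∀ v ∈ (PySem.Dict.ofList round_stats).values, (PySem.Dict.ofList v).contains stat = true
instance (round_stats : List (String × List (String × Int))) (stat : String) : Decidable (Pre_rank_genomes_by_stat round_stats stat) := by unfold Pre_rank_genomes_by_stat; infer_instance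

def pvWitness_rank_genomes_by_stat : (List (String × List (String × Int))) × String :=
  ([("aa", [("s", 1), ("t", 0)]), ("ab", [("s", 2), ("t", 0)]), ("ba", [("s", 1), ("t", 1)])], "s")

def Spec_rank_genomes_by_stat (round_stats : List (String × List (String × Int))) (stat : String) (out : List String) : Prop := out = rank_genomes_by_stat_alt round_stats stat
instance (round_stats : List (String × List (String × Int))) (stat : String) (out : List String) : Decidable (Spec_rank_genomes_by_stat round_stats stat out) := by unfold Spec_rank_genomes_by_stat; infer_instance

-- ===== CLAIM (what is proved, stated in full; the proofs are below) =====
def Claim_equal_rank_genomes_by_stat : Prop := ∀ (round_stats : List (String × List (String × Int))) (stat : String), Dom_rank_genomes_by_stat round_stats stat → Pre_rank_genomes_by_stat round_stats stat → Spec_rank_genomes_by_stat round_stats stat (rank_genomes_by_stat round_stats stat)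

-- ===== LEMMAS AND PROOFS =====

-- insertion of a value into a strictly descending list of distinct values (skip if present)
def insDesc (w : Int) : List Int → List Int
  | [] => [w]
  | v :: vs => if v < w then w :: v :: vs else if v = w then v :: vs else v :: insDesc w vs

theorem mem_insDesc (w : Int) (vs : List Int) (y : Int) :
    y ∈ insDesc w vs ↔ y = w ∨ y ∈ vs := by
  induction vs with
  | nil => simp [insDesc]
  | cons v vs ih =>
    simp only [insDesc]
    split_ifs with h1 h2
    · simp [List.mem_cons]
    · subst h2; simp [List.mem_cons]
    · simp [List.mem_cons, ih]; tauto

theorem insDesc_pairwise (w : Int) (vs : List Int) (h : vs.Pairwise (· > ·)) :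
    (insDesc w vs).Pairwise (· > ·) := by
  induction vs with
  | nil => simp [insDesc]
  | cons v vs ih =>
    rcases List.pairwise_cons.mp h with ⟨hv, hvs⟩
    simp only [insDesc]
    split_ifs with h1 h2
    · exact List.pairwise_cons.mpr ⟨by intro y hy; rcases List.mem_cons.mp hy with rfl | hy; exact h1; exact lt_trans (hv _ hy) h1, h⟩
    · exact h
    · refine List.pairwise_cons.mpr ⟨?_, ih hvs⟩
      intro y hy
      rcases (mem_insDesc w vs y).mp hy with rfl | hy
      · omega
      · exact hv _ hy

theorem insDesc_of_mem (w : Int) (vs : List Int) (h : vs.Pairwise (· > ·)) (hw : w ∈ vs) :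
    insDesc w vs = vs := by
  induction vs with
  | nil => simp at hw
  | cons v vs ih =>
    rcases List.pairwise_cons.mp h with ⟨hv, hvs⟩
    rcases List.mem_cons.mp hw with rfl | hw
    · simp [insDesc]
    · have := hv _ hw
      simp only [insDesc]
      rw [if_neg (by omega), if_neg (by omega), ih hvs hw]

theorem insDesc_perm (w : Int) (vs : List Int) (h : vs.Pairwise (· > ·)) (hw : w ∉ vs) :
    (insDesc w vs).Perm (w :: vs) := by
  induction vs with
  | nil => simp [insDesc]
  | cons v vs ih =>
    rcases List.pairwise_cons.mp h with ⟨hv, hvs⟩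
    simp only [insDesc]
    split_ifs with h1 h2
    · exact List.Perm.refl _
    · exact absurd h2.symm (by simp at hw; tauto)
    · have hw' : w ∉ vs := fun hm => hw (List.mem_cons_of_mem _ hm)
      exact ((ih hvs hw').cons v).trans (List.Perm.swap w v vs)

-- insertBy walks past elements it does not go before
theorem insertBy_append_of_not_before {α : Type} (bef : α → α → Bool) (x : α) (L M : List α)
    (h : ∀ e ∈ L, bef x e = false) :
    PySem.List.insertBy bef x (L ++ M) = L ++ PySem.List.insertBy bef x M := by
  induction L with
  | nil => simp
  | cons e L ih =>
    have he : bef x e = false := h e (List.mem_cons_self ..)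
    simp only [List.cons_append, PySem.List.insertBy, he, Bool.false_eq_true, if_false]
    exact congrArg (e :: ·) (ih (fun e' he' => h e' (List.mem_cons_of_mem _ he')))

theorem insertBy_cons_of_before {α : Type} (bef : α → α → Bool) (x : α) (M : List α)
    (h : ∀ e ∈ M, bef x e = true) :
    PySem.List.insertBy bef x M = x :: M := by
  cases M with
  | nil => rfl
  | cons e M => simp [PySem.List.insertBy, h e (List.mem_cons_self ..)]

-- inserting x into a flatten of strictly descending value blocks lands at the end of its block
theorem insertBy_flatMap (f : String → Int) (x : String) (vs : List Int) (G : Int → List String)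
    (hvs : vs.Pairwise (· > ·))
    (hG : ∀ v ∈ vs, ∀ e ∈ G v, f e = v)
    (hne : ∀ v ∈ vs, G v ≠ [])
    (hnew : f x ∉ vs → G (f x) = []) :
    PySem.List.insertBy (fun a b => decide (f b < f a)) x (vs.flatMap G) =
      (insDesc (f x) vs).flatMap (fun v => if v = f x then G v ++ [x] else G v) := by
  induction vs with
  | nil =>
    simp only [List.flatMap_nil, insDesc, List.flatMap_cons, List.flatMap_nil, List.append_nil]
    rw [hnew (by simp)]
    rfl
  | cons v vs ih =>
    rcases List.pairwise_cons.mp hvs with ⟨hv, hvs'⟩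
    have hGv : ∀ e ∈ G v, f e = v := hG v (List.mem_cons_self ..)
    simp only [List.flatMap_cons, insDesc]
    split_ifs with h1 h2
    · -- v < f x : x goes in front of everything
      have hall : ∀ e ∈ G v ++ vs.flatMap G, (fun a b => decide (f b < f a)) x e = true := by
        intro e he
        rcases List.mem_append.mp he with he | he
        · simp [hGv e he]; omega
        · rcases List.mem_flatMap.mp he with ⟨u, hu, heu⟩
          have := hG u (List.mem_cons_of_mem _ hu) e heu
          have := hv u hu
          simp [‹f e = u›]; omega
      rw [insertBy_cons_of_before _ _ _ hall]
      have hnx : f x ∉ v :: vs := by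
        intro hm
        rcases List.mem_cons.mp hm with rfl | hm
        · omega
        · have := hv _ hm; omega
      have hrest : ∀ u ∈ v :: vs, (if u = f x then G u ++ [x] else G u) = G u := by
        intro u hu
        rw [if_neg]
        intro h; exact hnx (h ▸ hu)
      rw [List.flatMap_cons, if_pos rfl, hnew hnx, List.flatMap_congr hrest]
      simp
    · -- v = f x : x goes at the end of block G v
      have hskip : ∀ e ∈ G v, (fun a b => decide (f b < f a)) x e = false := by
        intro e he; simp [hGv e he, h2]
      rw [insertBy_append_of_not_before _ _ _ _ hskip]
      have hall : ∀ e ∈ vs.flatMap G, (fun a b => decide (f b < f a)) x e = true := by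
        intro e he
        rcases List.mem_flatMap.mp he with ⟨u, hu, heu⟩
        have := hG u (List.mem_cons_of_mem _ hu) e heu
        have := hv u hu
        simp [‹f e = u›]; omega
      rw [insertBy_cons_of_before _ _ _ hall]
      have hrest : ∀ u ∈ vs, (if u = f x then G u ++ [x] else G u) = G u := by
        intro u hu
        rw [if_neg]; intro h; have := hv u hu; omega
      rw [List.flatMap_cons, if_pos h2, List.flatMap_congr hrest]
      simp
    · -- v > f x : recurse into the tail
      have hskip : ∀ e ∈ G v, (fun a b => decide (f b < f a)) x e = false := by
        intro e he; simp [hGv e he]; omega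
      rw [insertBy_append_of_not_before _ _ _ _ hskip]
      rw [ih hvs' (fun u hu => hG u (List.mem_cons_of_mem _ hu))
        (fun u hu => hne u (List.mem_cons_of_mem _ hu))
        (fun hnx => hnew (by intro hm; rcases List.mem_cons.mp hm with h | h; omega; exact hnx h))]
      rw [List.flatMap_cons, if_neg (by omega)]

-- sorted of a Nodup list of values, descending, is strictly descending
theorem sorted_values_pairwise_gt (S : List Int) (hS : S.Nodup) :
    (PySem.List.sorted S (fun v => v) true).Pairwise (· > ·) := by
  have h1 : (PySem.List.sorted S (fun v => v) true).Pairwise (fun a b => b ≤ a) :=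
    PySem.List.sorted_pairwise_rev S (fun v => v)
  have h2 : (PySem.List.sorted S (fun v => v) true).Nodup :=
    (PySem.List.sorted_perm S (fun v => v) true).symm.nodup hS
  exact (h1.and h2).imp (fun h => lt_of_le_of_ne h.1 (fun he => h.2 he.symm))

theorem sorted_add (S : PySem.Set Int) (hS : S.Nodup) (w : Int) :
    PySem.List.sorted (PySem.Set.add S w) (fun v => v) true =
      insDesc w (PySem.List.sorted S (fun v => v) true) := by
  have hperm : (PySem.List.sorted S (fun v => v) true).Perm S := PySem.List.sorted_perm S _ true
  have hpw := sorted_values_pairwise_gt S hS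
  by_cases hw : w ∈ S
  · rw [PySem.Set.add_of_mem hw, insDesc_of_mem _ _ hpw (hperm.mem_iff.mpr hw)]
  · rw [PySem.Set.add_of_not_mem hw]
    apply PySem.List.sorted_rev_eq_of_perm_of_pairwise_gt
    · exact (insDesc_perm w _ hpw (fun hm => hw (hperm.subset hm))).trans
        ((hperm.cons w).trans (List.perm_append_singleton w S).symm)
    · exact insDesc_pairwise w _ hpw

-- THE STABILITY LEMMA: a stable descending sort equals the flatten, over the distinct values in
-- descending order, of the groups of equal-valued elements in original order.
theorem stable_sort_eq_groups (f : String → Int) (ks : List String) :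
    PySem.List.sorted ks f true =
      (PySem.List.sorted (PySem.Set.ofList (ks.map f)) (fun v => v) true).flatMap
        (fun v => ks.filter (fun g => f g = v)) := by
  induction ks using List.reverseRecOn with
  | nil => simp [PySem.List.sorted]
  | append_singleton ks x ih =>
    rw [PySem.List.sorted_rev_eq_foldl_insertBy, List.foldl_append, List.foldl_cons, List.foldl_nil,
      ← PySem.List.sorted_rev_eq_foldl_insertBy, ih]
    have hSnodup : (PySem.Set.ofList (ks.map f)).Nodup := PySem.Set.nodup_ofList _
    have hpw : (PySem.List.sorted (PySem.Set.ofList (ks.map f)) (fun v => v) true).Pairwise (· > ·) :=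
      sorted_values_pairwise_gt _ hSnodup
    have hmemvs : ∀ v, v ∈ PySem.List.sorted (PySem.Set.ofList (ks.map f)) (fun v => v) true ↔ v ∈ ks.map f := by
      intro v
      rw [PySem.List.mem_sorted, PySem.Set.mem_ofList]
    rw [insertBy_flatMap f x _ _ hpw
      (by
        intro v _ e he
        exact of_decide_eq_true (List.mem_filter.mp he).2)
      (by
        intro v hv
        rcases List.mem_map.mp ((hmemvs v).mp hv) with ⟨g, hg, hfg⟩
        exact List.ne_nil_of_mem (List.mem_filter.mpr ⟨hg, decide_eq_true hfg⟩))
      (by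
        intro hnx
        refine List.filter_eq_nil_iff.mpr (fun g hg => ?_)
        simp only [decide_eq_true_eq]
        intro h
        exact hnx ((hmemvs (f x)).mpr (List.mem_map.mpr ⟨g, hg, h⟩)))]
    rw [List.map_append, List.map_singleton, PySem.Set.ofList_append_singleton,
      sorted_add _ hSnodup (f x)]
    refine (List.flatMap_congr (fun v hv => ?_)).symm
    rw [List.filter_append]
    by_cases h : v = f x
    · subst h
      simp
    · rw [if_neg h]
      have : ¬ (f x = v) := fun he => h he.symm
      simp [this]

-- getD of the group dict built by A's loop
theorem getD_group_loop (f : String → Int) (ks : List String) (d : PySem.Dict Int (List String)) (v : Int) :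
    (ks.foldl (fun gbv g =>
        (if gbv.contains (f g) then gbv else gbv.insert (f g) []).modify (f g) [] (fun l => l ++ [g])) d).getD v [] =
      d.getD v [] ++ ks.filter (fun g => f g = v) := by
  induction ks generalizing d with
  | nil => simp
  | cons g ks ih =>
    simp only [List.foldl_cons, ih, List.filter_cons]
    have hbase : ∀ w, ((if d.contains (f g) then d else d.insert (f g) []) : PySem.Dict Int (List String)).getD w [] = d.getD w [] := by
      intro w
      split_ifs with hc
      · rfl
      · rw [PySem.Dict.getD_insert]
        split_ifs with hw
        · rw [hw, PySem.Dict.getD_of_not_contains _ _ (by simpa using hc)]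
        · rfl
    rw [PySem.Dict.getD_modify, hbase, hbase]
    by_cases hv : v = f g
    · simp [hv]
    · have hv' : ¬ f g = v := fun h => hv h.symm
      simp [hv, hv']

-- keys of the group dict built by A's loop
theorem keys_group_loop (f : String → Int) (ks : List String) (d : PySem.Dict Int (List String)) :
    (ks.foldl (fun gbv g =>
        (if gbv.contains (f g) then gbv else gbv.insert (f g) []).modify (f g) [] (fun l => l ++ [g])) d).keys =
      PySem.Set.update d.keys (ks.map f) := by
  induction ks generalizing d with
  | nil => simp [PySem.Set.update]
  | cons g ks ih =>
    simp only [List.foldl_cons, ih, List.map_cons, PySem.Set.update_cons]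
    congr 1
    by_cases hc : d.contains (f g) = true
    · simp only [hc, if_true]
      rw [PySem.Dict.keys_modify, PySem.Dict.keys_insert_of_contains _ _ (by simpa using hc),
        PySem.Set.add_of_mem ((PySem.Dict.contains_iff_mem_keys d (f g)).mp hc)]
    · have hc' : d.contains (f g) = false := by simpa using hc
      have hnm : f g ∉ d.keys := fun hm => by
        rw [(PySem.Dict.contains_iff_mem_keys d (f g)).mpr hm] at hc'; simp at hc'
      rw [if_neg hc, PySem.Dict.keys_modify,
        PySem.Dict.keys_insert_of_contains _ _ (by simp),
        PySem.Dict.keys_insert_of_not_contains _ _ hc', PySem.Set.add_of_not_mem hnm]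

-- the whole of A's pipeline, for an arbitrary key function, equals B's single stable sort
theorem group_then_flatten_eq_sorted (f : String → Int) (ks : List String) :
    (PySem.List.sorted
        (ks.foldl (fun gbv g =>
          (if gbv.contains (f g) then gbv else gbv.insert (f g) []).modify (f g) [] (fun l => l ++ [g])) PySem.Dict.empty).keys (fun v => v) true).foldl
      (fun acc stat_val =>
        ((ks.foldl (fun gbv g =>
          (if gbv.contains (f g) then gbv else gbv.insert (f g) []).modify (f g) [] (fun l => l ++ [g])) PySem.Dict.empty).getD stat_val []).foldl
          (fun acc2 genome => acc2 ++ [genome]) acc) [] =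
    PySem.List.sorted ks f true := by
  rw [keys_group_loop f ks PySem.Dict.empty, PySem.Dict.keys_empty, PySem.Set.update_nil_left]
  have hstep : (fun (acc : List String) stat_val =>
        ((ks.foldl (fun gbv g =>
          (if gbv.contains (f g) then gbv else gbv.insert (f g) []).modify (f g) [] (fun l => l ++ [g])) PySem.Dict.empty).getD stat_val []).foldl
          (fun acc2 genome => acc2 ++ [genome]) acc) =
      (fun acc stat_val => acc ++ (ks.foldl (fun gbv g =>
          (if gbv.contains (f g) then gbv else gbv.insert (f g) []).modify (f g) [] (fun l => l ++ [g])) PySem.Dict.empty).getD stat_val []) := by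
    funext acc v
    exact PySem.List.foldl_append_singleton _ _
  rw [hstep, PySem.List.foldl_append_eq_flatMap, List.nil_append, stable_sort_eq_groups f ks]
  refine List.flatMap_congr (fun v _ => ?_)
  rw [getD_group_loop f ks PySem.Dict.empty v, PySem.Dict.getD_empty, List.nil_append]

-- ===== VERDICT (by name: the statement is the Claim_ definition above) =====
theorem rank_genomes_by_stat_spec : Claim_equal_rank_genomes_by_stat := by
  intro round_stats stat _ _
  unfold Spec_rank_genomes_by_stat rank_genomes_by_stat rank_genomes_by_stat_alt
  dsimp only
  exact (group_then_flatten_eq_sorted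
    (fun g => pvStatOf (PySem.Dict.ofList round_stats) stat g)
    (PySem.Dict.ofList round_stats).keys)
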